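-- pv_equiv track=rewrite | github.com/mokhiya/my_corpus | compare-skipgram.py | checkWord
-- ===== SOURCE A (Python) =====
-- def checkWord(word):
--     ok = True
--     if not (1 <= len(word) <= 100):
--         ok = False
--     for i in range(10):
--         if str(i) in word:
--             ok = False
--     return ok
-- ===== SOURCE B (Python) =====
-- def checkWord(word):
--     return 1 <= len(word) <= 100 and not any(c in "0123456789" for c in word)
-- ===== Notes on version B (the rewrite author's own statement) =====
-- stated objective: idiomatic
-- what changed: Replaces the mutable flag and the 10-iteration loop that substring-scans the word once per digit with a single guarded expression that traverses the word's characters once, testing each against an explicit ASCII digit set.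
import Mathlib
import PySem

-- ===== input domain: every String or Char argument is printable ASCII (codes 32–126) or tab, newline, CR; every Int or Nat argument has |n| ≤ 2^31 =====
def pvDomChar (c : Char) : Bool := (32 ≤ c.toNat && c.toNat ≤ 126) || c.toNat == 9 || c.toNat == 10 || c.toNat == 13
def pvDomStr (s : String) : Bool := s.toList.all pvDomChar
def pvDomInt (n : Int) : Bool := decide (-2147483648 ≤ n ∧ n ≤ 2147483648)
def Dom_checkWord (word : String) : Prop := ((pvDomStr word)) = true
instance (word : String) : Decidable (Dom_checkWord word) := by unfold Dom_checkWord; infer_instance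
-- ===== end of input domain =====

-- B replaces the per-digit substring scans with one pass over the word's characters (idiomatic; same behaviour).
-- ===== PORT A =====
def checkWord (word : String) : Bool :=
  let ok := true
  let ok := if ¬ (1 ≤ PySem.Str.len word ∧ PySem.Str.len word ≤ 100) then false else ok
  (PySem.List.pyRange 0 10 1).foldl
    (fun ok i => if PySem.Str.isIn (PySem.Int.toStr i) word then false else ok) ok

-- ===== PORT B =====
-- One pass over the word's characters against an explicit ASCII digit set.
def checkWord_alt (word : String) : Bool :=
  decide (1 ≤ PySem.Str.len word ∧ PySem.Str.len word ≤ 100)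
    && !(word.toList.any (fun c => c ∈ "0123456789".toList))

-- ===== PRECONDITION & SPEC =====
def Spec_checkWord (word : String) (out : Bool) : Prop := out = checkWord_alt word
instance (word : String) (out : Bool) : Decidable (Spec_checkWord word out) := by unfold Spec_checkWord; infer_instance

-- ===== CLAIM (what is proved, stated in full; the proofs are below) =====
def Claim_equal_checkWord : Prop := ∀ (word : String), Dom_checkWord word → Spec_checkWord word (checkWord word)

-- ===== LEMMAS AND PROOFS =====

lemma any_mem_comm (l D : List Char) : l.any (fun c => c ∈ D) = D.any (fun d => d ∈ l) := by
  rw [Bool.eq_iff_iff]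
  simp only [List.any_eq_true, decide_eq_true_eq]
  constructor <;> rintro ⟨x, hx, hy⟩ <;> exact ⟨x, hy, hx⟩

lemma infix_singleton_iff (c : Char) (l : List Char) : [c] <:+: l ↔ c ∈ l := by
  constructor
  · intro hi; exact hi.subset (List.mem_singleton_self c)
  · intro hm
    obtain ⟨p, q, rfl⟩ := List.append_of_mem hm
    exact ⟨p, q, by simp⟩

lemma isIn_single (c : Char) (s sub : String) (h : sub.toList = [c]) :
    PySem.Str.isIn sub s = decide (c ∈ s.toList) := by
  have h1 := PySem.Str.isIn_iff_infix (sub := sub) (s := s)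
  rw [h, infix_singleton_iff] at h1
  cases hb : PySem.Str.isIn sub s
  · symm
    rw [decide_eq_false_iff_not]
    intro hm
    exact absurd (h1.mpr hm) (ne_true_of_eq_false hb)
  · exact (decide_eq_true (h1.mp hb)).symm

lemma ite_ff (p : Prop) [Decidable p] (a : Bool) : (if p then false else a) = (!(decide p) && a) := by
  by_cases h : p <;> simp [h]

lemma foldl_loop (ds : List Int) (word : String) (ok : Bool) :
    ds.foldl (fun ok i => if PySem.Str.isIn (PySem.Int.toStr i) word then false else ok) ok
      = (ok && !(ds.any (fun i => PySem.Str.isIn (PySem.Int.toStr i) word))) := by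
  induction ds generalizing ok with
  | nil => simp
  | cons d t ih =>
    rw [List.foldl_cons, ih, List.any_cons]
    cases PySem.Str.isIn (PySem.Int.toStr d) word <;> cases ok <;> simp

-- ===== VERDICT (by name: the statement is the Claim_ definition above) =====
theorem checkWord_spec : Claim_equal_checkWord := by
  intro word _
  unfold Spec_checkWord checkWord checkWord_alt
  rw [foldl_loop, show PySem.List.pyRange 0 10 1 = [0,1,2,3,4,5,6,7,8,9] from by decide,
    any_mem_comm, ite_ff,
    show "0123456789".toList = ['0','1','2','3','4','5','6','7','8','9'] from rfl]
  simp only [List.any_cons, List.any_nil]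
  rw [isIn_single '0' word (PySem.Int.toStr 0) (by decide),
    isIn_single '1' word (PySem.Int.toStr 1) (by decide),
    isIn_single '2' word (PySem.Int.toStr 2) (by decide),
    isIn_single '3' word (PySem.Int.toStr 3) (by decide),
    isIn_single '4' word (PySem.Int.toStr 4) (by decide),
    isIn_single '5' word (PySem.Int.toStr 5) (by decide),
    isIn_single '6' word (PySem.Int.toStr 6) (by decide),
    isIn_single '7' word (PySem.Int.toStr 7) (by decide),
    isIn_single '8' word (PySem.Int.toStr 8) (by decide),
    isIn_single '9' word (PySem.Int.toStr 9) (by decide)]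
  simp only [Bool.or_false, decide_not, Bool.not_not, Bool.and_true]
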